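-- pv_equiv track=rewrite | github.com/juhe1/tanki_2014_server_public | python_tools/version_and_id_to_path.py | long_to_oct
-- ===== SOURCE A (Python) =====
-- def number_to_base(number, base):
--     if number == 0:
--         return "0"
--     digits = ""
--     while number:
--         digits = str(number % base) + digits
--         number //= base
--     return digits
--
-- def to_oct(value):
--     result = number_to_base(value, 8)
--     if len(result) < 2:
--         return "0" + result
--     else:
--         return result
--
-- def trim_leading_zeros(string):
--     i = 0
--     while(i < len(string) and string[i] == "0"):
--         i += 1
--     return string[i:]
--
-- def long_to_oct(number):
--     number_bytes = number.to_bytes(8, 'big', signed=True)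
--     high = int.from_bytes( number_bytes[:4] , byteorder='big', signed=False)
--     low = int.from_bytes( number_bytes[-4:] , byteorder='big', signed=False)
--
--     number1 = 0
--     number2 = 0
--     version_oct1 = ""
--     version_oct2 = ""
--     offset = 0
--
--     for i in range(5):
--         number1 = (high & 63 << 4 + offset) >> offset + 4
--         number2 = (low & 63 << offset) >> offset
--         version_oct1 = to_oct(number1) + version_oct1
--         version_oct2 = to_oct(number2) + version_oct2
--         offset += 6
--
--     version = version_oct1 + to_oct(((high & 15) << 2) + (low >> 30)) + version_oct2
--     return trim_leading_zeros(version)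
-- ===== SOURCE B (Python) =====
-- def long_to_oct(number):
--     value = int.from_bytes(number.to_bytes(8, 'big', signed=True), 'big', signed=False)
--     return format(value, 'o').lstrip('0')
-- ===== Notes on version B (the rewrite author's own statement) =====
-- stated objective: simpler
-- what changed: Replaces the fixed bit-group extraction loop and the number_to_base/to_oct/trim helpers with a direct octal formatting of the unsigned wrapped value followed by lstrip of leading zeros.
import Mathlib
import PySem

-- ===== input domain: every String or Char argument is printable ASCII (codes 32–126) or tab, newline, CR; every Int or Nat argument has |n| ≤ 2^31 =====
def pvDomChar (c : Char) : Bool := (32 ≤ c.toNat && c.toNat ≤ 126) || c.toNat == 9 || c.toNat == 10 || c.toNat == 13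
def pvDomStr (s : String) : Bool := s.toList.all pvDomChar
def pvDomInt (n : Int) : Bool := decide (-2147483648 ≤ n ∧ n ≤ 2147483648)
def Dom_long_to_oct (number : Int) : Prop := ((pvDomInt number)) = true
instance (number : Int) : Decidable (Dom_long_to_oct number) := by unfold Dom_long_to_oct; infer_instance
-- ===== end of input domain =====

-- B replaces A's fixed bit-group extraction loop and its base-conversion helpers by one
-- direct octal conversion of the unsigned 64-bit value followed by lstrip('0') (objective: simpler).

-- ===== PORT A =====
-- the while-loop of number_to_base; base is 8 at every call site (the loop divides by 8)
def ntbLoop (number : Nat) (digits : String) : String :=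
  if number = 0 then digits
  else ntbLoop (number / 8) (toString (number % 8) ++ digits)
decreasing_by exact Nat.div_lt_self (Nat.pos_of_ne_zero (by assumption)) (by norm_num)

def number_to_base (number : Nat) : String :=
  if number = 0 then "0" else ntbLoop number ""

def to_oct (value : Nat) : String :=
  let result := number_to_base value
  if result.length < 2 then "0" ++ result else result

-- Python's index-advancing loop followed by the slice string[i:] ≡ structural strip of leading '0'
def trimLoop : List Char → List Char
  | '0' :: rest => trimLoop rest
  | other => other

def trim_leading_zeros (string : String) : String := String.ofList (trimLoop string.toList)

def long_to_oct (number : Int) : String :=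
  -- to_bytes(8,'big',signed=True) then int.from_bytes of the two 4-byte halves:
  -- exactly the upper/lower 32 bits of number mod 2^64 (nonnegative, hence computed in Nat);
  -- |number| ≤ 2^31 on Dom, so the signed to_bytes never raises OverflowError
  let nb : Nat := (number.emod 18446744073709551616).toNat
  let high : Nat := nb / 4294967296
  let low : Nat := nb % 4294967296
  let st := (List.range 5).foldl
    (fun (st : String × String × Nat) (_ : Nat) =>
      let offset := st.2.2
      let number1 := (high &&& (63 <<< (4 + offset))) >>> (offset + 4)
      let number2 := (low &&& (63 <<< offset)) >>> offset
      (to_oct number1 ++ st.1, to_oct number2 ++ st.2.1, offset + 6))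
    ("", "", 0)
  let version := st.1 ++ to_oct (((high &&& 15) <<< 2) + (low >>> 30)) ++ st.2.1
  trim_leading_zeros version

-- ===== PORT B =====
-- format(value,'o'): most-significant-first octal digits, "0" for 0
def octGo (n : Nat) : List Char :=
  if n < 8 then [Nat.digitChar n]
  else octGo (n / 8) ++ [Nat.digitChar (n % 8)]
decreasing_by exact Nat.div_lt_self (by omega) (by norm_num)

def long_to_oct_alt (number : Int) : String :=
  -- int.from_bytes(number.to_bytes(8,'big',signed=True),'big',signed=False) = number mod 2^64
  let value : Nat := (number.emod 18446744073709551616).toNat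
  String.ofList ((octGo value).dropWhile (· = '0'))   -- format(value,'o').lstrip('0')

-- ===== PRECONDITION & SPEC =====
def Spec_long_to_oct (number : Int) (out : String) : Prop := out = long_to_oct_alt number
instance (number : Int) (out : String) : Decidable (Spec_long_to_oct number out) := by unfold Spec_long_to_oct; infer_instance

-- ===== CLAIM (what is proved, stated in full; the proofs are below) =====
def Claim_equal_long_to_oct : Prop := ∀ (number : Int), Dom_long_to_oct number → Spec_long_to_oct number (long_to_oct number)

-- ===== LEMMAS AND PROOFS =====

-- canonical octal digit list, empty for 0
def octL (n : Nat) : List Char :=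
  if n = 0 then [] else octL (n / 8) ++ [Nat.digitChar (n % 8)]
decreasing_by exact Nat.div_lt_self (Nat.pos_of_ne_zero (by assumption)) (by norm_num)

-- octal digit list of v padded with leading zeros to exactly k digits
def padL : Nat → Nat → List Char
  | 0, _ => []
  | k + 1, v => padL k (v / 8) ++ [Nat.digitChar (v % 8)]

theorem trimLoop_cons (c : Char) (l : List Char) :
    trimLoop (c :: l) = if c = '0' then trimLoop l else c :: l := by
  by_cases h : c = '0'
  · simp [h, trimLoop]
  · simp only [h, if_false]
    rw [trimLoop.eq_def]; split <;> simp_all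

theorem trimLoop_append (xs ys : List Char) :
    trimLoop (xs ++ ys) = if trimLoop xs = [] then trimLoop ys else trimLoop xs ++ ys := by
  induction xs with
  | nil => simp [trimLoop]
  | cons c xs ih =>
    by_cases h : c = '0'
    · simpa [h, trimLoop_cons] using ih
    · simp [h, trimLoop_cons]

theorem octL_ne_nil {v : Nat} (h : v ≠ 0) : octL v ≠ [] := by
  rw [octL]; simp [h]

theorem digitChar_ne_zero {d : Nat} (h1 : 0 < d) (h2 : d < 8) : Nat.digitChar d ≠ '0' := by
  interval_cases d <;> decide

theorem trim_padL (k v : Nat) (h : v < 8 ^ k) : trimLoop (padL k v) = octL v := by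
  induction k generalizing v with
  | zero => interval_cases v; simp [padL, octL, trimLoop]
  | succ k ih =>
    have hdiv : v / 8 < 8 ^ k := by
      have : v < 8 ^ k * 8 := by rw [pow_succ] at h; omega
      omega
    rw [padL, trimLoop_append, ih _ hdiv]
    have h0 : octL 0 = ([] : List Char) := by rw [octL]; simp
    by_cases hv : v = 0
    · simp [hv, h0]; decide
    · by_cases hq : v / 8 = 0
      · have h8 : v < 8 := by omega
        rw [hq, h0, if_pos rfl, trimLoop_cons,
          if_neg (digitChar_ne_zero (by omega) (by omega))]
        conv_rhs => rw [octL]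
        simp [hv, hq, h0]
      · rw [if_neg (octL_ne_nil hq)]
        conv_rhs => rw [octL]
        simp [hv]

theorem padL_split (j k v : Nat) : padL (j + k) v = padL j (v / 8 ^ k) ++ padL k (v % 8 ^ k) := by
  induction k generalizing v with
  | zero => simp [padL]
  | succ k ih =>
    have e1 : v % 8 ^ (k + 1) % 8 = v % 8 :=
      Nat.mod_mod_of_dvd v ⟨8 ^ k, by ring⟩
    have e2 : v % 8 ^ (k + 1) / 8 = v / 8 % 8 ^ k := by
      rw [pow_succ', Nat.mod_mul_right_div_self]
    have e3 : v / 8 ^ (k + 1) = v / 8 / 8 ^ k := by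
      rw [pow_succ', ← Nat.div_div_eq_div_mul]
    show padL (j + k) (v / 8) ++ [Nat.digitChar (v % 8)] = _
    conv_rhs => rw [padL]
    rw [ih (v / 8), e3, e2, e1, List.append_assoc]

theorem octL_head_ne_zero {v : Nat} (h : v ≠ 0) :
    ∃ c rest, octL v = c :: rest ∧ c ≠ '0' := by
  induction v using Nat.strong_induction_on with
  | _ v ih =>
    by_cases hq : v / 8 = 0
    · have h8 : v < 8 := by omega
      refine ⟨Nat.digitChar v, [], ?_, ?_⟩
      · rw [octL, if_neg h, hq, octL, if_pos rfl, Nat.mod_eq_of_lt h8]; rfl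
      · interval_cases v <;> simp_all <;> decide
    · obtain ⟨c, rest, hc, hne⟩ := ih (v / 8) (Nat.div_lt_self (by omega) (by norm_num)) hq
      exact ⟨c, rest ++ [Nat.digitChar (v % 8)], by rw [octL, if_neg h, hc]; rfl, hne⟩

theorem octGo_eq_octL {v : Nat} (h : v ≠ 0) : octGo v = octL v := by
  induction v using Nat.strong_induction_on with
  | _ v ih =>
    by_cases h8 : v < 8
    · rw [octGo, if_pos h8, octL, if_neg h, octL]
      simp [Nat.div_eq_of_lt h8, Nat.mod_eq_of_lt h8]
    · rw [octGo, if_neg h8, octL, if_neg h,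
        ih (v / 8) (Nat.div_lt_self (by omega) (by norm_num)) (by omega)]

theorem alt_eq_octL (v : Nat) : (octGo v).dropWhile (· = '0') = octL v := by
  by_cases h : v = 0
  · subst h
    have h1 : octGo 0 = ['0'] := by rw [octGo, if_pos (by norm_num)]; decide
    have h2 : octL 0 = ([] : List Char) := by rw [octL]; simp
    rw [h1, h2]; decide
  · rw [octGo_eq_octL h]
    obtain ⟨c, rest, hc, hne⟩ := octL_head_ne_zero h
    rw [hc, List.dropWhile_cons, if_neg (by simpa using hne)]

theorem toString_digit (d : Nat) (h : d < 8) : toString d = String.ofList [Nat.digitChar d] := by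
  interval_cases d <;> decide

theorem ntbLoop_toList (n : Nat) : ∀ digits, (ntbLoop n digits).toList = octL n ++ digits.toList := by
  induction n using Nat.strong_induction_on with
  | _ n ih =>
    intro digits
    by_cases h : n = 0
    · rw [ntbLoop, if_pos h, h, octL]; simp
    · rw [ntbLoop, if_neg h, ih (n / 8) (Nat.div_lt_self (by omega) (by norm_num)),
        toString_digit _ (Nat.mod_lt _ (by norm_num))]
      conv_rhs => rw [octL, if_neg h]
      simp

theorem octL_small {g : Nat} (h : g < 8) (h0 : g ≠ 0) : octL g = [Nat.digitChar g] := by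
  rw [octL, if_neg h0, Nat.div_eq_of_lt h, octL, if_pos rfl, Nat.mod_eq_of_lt h]
  simp

theorem to_oct_toList (g : Nat) (h : g < 64) : (to_oct g).toList = padL 2 g := by
  have key : to_oct g = if (number_to_base g).length < 2 then "0" ++ number_to_base g
      else number_to_base g := rfl
  have hp : padL 2 g = [Nat.digitChar (g / 8), Nat.digitChar (g % 8)] := by
    simp [padL, Nat.mod_eq_of_lt (show g / 8 < 8 by omega)]
  by_cases h0 : g = 0
  · have hnb : number_to_base 0 = "0" := by rw [number_to_base]; rfl
    subst h0
    rw [key, hnb, if_pos (by decide), hp]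
    decide
  · by_cases h8 : g < 8
    · have hnb : (number_to_base g).toList = [Nat.digitChar g] := by
        rw [number_to_base, if_neg h0, ntbLoop_toList, octL_small h8 h0]; simp
      have hlen : (number_to_base g).length = 1 := by
        rw [← String.length_toList, hnb]; rfl
      rw [key, if_pos (by omega), hp]
      simp [hnb, Nat.div_eq_of_lt h8, Nat.mod_eq_of_lt h8]
      decide
    · have hnb : (number_to_base g).toList = [Nat.digitChar (g / 8), Nat.digitChar (g % 8)] := by
        rw [number_to_base, if_neg h0, ntbLoop_toList]
        conv_lhs => rw [octL, if_neg h0]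
        rw [octL_small (by omega) (by omega)]
        simp
      have hlen : (number_to_base g).length = 2 := by
        rw [← String.length_toList, hnb]; rfl
      rw [key, if_neg (by omega), hp, ← hnb]

theorem group_eq (h t : Nat) : (h &&& (63 <<< t)) >>> t = h / 2 ^ t % 64 := by
  have key : (h &&& (63 <<< t)) >>> t = (h >>> t) &&& 63 := by
    apply Nat.eq_of_testBit_eq
    intro i
    simp only [Nat.testBit_shiftRight, Nat.testBit_and, Nat.testBit_shiftLeft]
    have hi : t ≤ t + i := by omega
    have he : t + i - t = i := by omega
    simp [hi, he]
  rw [key, Nat.shiftRight_eq_div_pow]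
  have : (63 : Nat) = 2 ^ 6 - 1 := by norm_num
  rw [this, Nat.and_two_pow_sub_one_eq_mod]

theorem and15 (h : Nat) : h &&& 15 = h % 16 := by
  have : (15 : Nat) = 2 ^ 4 - 1 := by norm_num
  rw [this, Nat.and_two_pow_sub_one_eq_mod]

theorem mid_eq (v : Nat) :
    ((v / 4294967296 % 16) <<< 2) + (v % 4294967296) >>> 30 = v / 1073741824 % 64 := by
  rw [Nat.shiftLeft_eq, Nat.shiftRight_eq_div_pow]
  norm_num
  omega

theorem pad22 (v : Nat) (hv : v < 18446744073709551616) :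
    padL 22 v =
      padL 2 (v / 1152921504606846976 % 64) ++ padL 2 (v / 18014398509481984 % 64) ++
      padL 2 (v / 281474976710656 % 64) ++ padL 2 (v / 4398046511104 % 64) ++
      padL 2 (v / 68719476736 % 64) ++ padL 2 (v / 1073741824 % 64) ++
      padL 2 (v / 16777216 % 64) ++ padL 2 (v / 262144 % 64) ++
      padL 2 (v / 4096 % 64) ++ padL 2 (v / 64 % 64) ++ padL 2 (v % 64) := by
  have s1 := padL_split 20 2 v
  have s2 := padL_split 18 2 (v / 64)
  have s3 := padL_split 16 2 (v / 4096)
  have s4 := padL_split 14 2 (v / 262144)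
  have s5 := padL_split 12 2 (v / 16777216)
  have s6 := padL_split 10 2 (v / 1073741824)
  have s7 := padL_split 8 2 (v / 68719476736)
  have s8 := padL_split 6 2 (v / 4398046511104)
  have s9 := padL_split 4 2 (v / 281474976710656)
  have s10 := padL_split 2 2 (v / 18014398509481984)
  norm_num [Nat.div_div_eq_div_mul] at s1 s2 s3 s4 s5 s6 s7 s8 s9 s10
  have htop : v / 1152921504606846976 % 64 = v / 1152921504606846976 := by omega
  rw [show (22:Nat) = 20 + 2 from rfl, s1, s2, s3, s4, s5, s6, s7, s8, s9, s10, htop]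

theorem to_oct_mod (x : Nat) : (to_oct (x % 64)).toList = padL 2 (x % 64) :=
  to_oct_toList _ (Nat.mod_lt _ (by norm_num))

-- the 5-iteration fold of port A, unrolled (definitional)
set_option maxHeartbeats 1000000 in
theorem A_unfold (n : Int) :
    long_to_oct n =
      trim_leading_zeros
        ((to_oct (((n.emod 18446744073709551616).toNat / 4294967296 &&& (63 <<< 28)) >>> 28) ++
          (to_oct (((n.emod 18446744073709551616).toNat / 4294967296 &&& (63 <<< 22)) >>> 22) ++
           (to_oct (((n.emod 18446744073709551616).toNat / 4294967296 &&& (63 <<< 16)) >>> 16) ++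
            (to_oct (((n.emod 18446744073709551616).toNat / 4294967296 &&& (63 <<< 10)) >>> 10) ++
             (to_oct (((n.emod 18446744073709551616).toNat / 4294967296 &&& (63 <<< 4)) >>> 4) ++ ""))))) ++
         to_oct ((((n.emod 18446744073709551616).toNat / 4294967296 &&& 15) <<< 2) +
           (((n.emod 18446744073709551616).toNat % 4294967296) >>> 30)) ++
         (to_oct (((n.emod 18446744073709551616).toNat % 4294967296 &&& (63 <<< 24)) >>> 24) ++
          (to_oct (((n.emod 18446744073709551616).toNat % 4294967296 &&& (63 <<< 18)) >>> 18) ++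
           (to_oct (((n.emod 18446744073709551616).toNat % 4294967296 &&& (63 <<< 12)) >>> 12) ++
            (to_oct (((n.emod 18446744073709551616).toNat % 4294967296 &&& (63 <<< 6)) >>> 6) ++
             (to_oct (((n.emod 18446744073709551616).toNat % 4294967296 &&& (63 <<< 0)) >>> 0) ++ "")))))) := by
  rfl

-- ===== VERDICT (by name: the statement is the Claim_ definition above) =====
set_option maxHeartbeats 1000000 in
theorem long_to_oct_spec : Claim_equal_long_to_oct := by
  intro number _
  unfold Spec_long_to_oct
  have hB : long_to_oct_alt number =
      String.ofList ((octGo ((number.emod 18446744073709551616).toNat)).dropWhile (· = '0')) := rfl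
  rw [A_unfold, hB]
  set v : Nat := (number.emod 18446744073709551616).toNat with hvdef
  have hv : v < 18446744073709551616 := by
    have h1 : number.emod 18446744073709551616 < 18446744073709551616 :=
      Int.emod_lt_of_pos number (by norm_num)
    omega
  rw [alt_eq_octL]
  have g1 : (v / 4294967296 &&& (63 <<< 28)) >>> 28 = v / 1152921504606846976 % 64 := by
    rw [group_eq]; norm_num [Nat.div_div_eq_div_mul]
  have g2 : (v / 4294967296 &&& (63 <<< 22)) >>> 22 = v / 18014398509481984 % 64 := by
    rw [group_eq]; norm_num [Nat.div_div_eq_div_mul]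
  have g3 : (v / 4294967296 &&& (63 <<< 16)) >>> 16 = v / 281474976710656 % 64 := by
    rw [group_eq]; norm_num [Nat.div_div_eq_div_mul]
  have g4 : (v / 4294967296 &&& (63 <<< 10)) >>> 10 = v / 4398046511104 % 64 := by
    rw [group_eq]; norm_num [Nat.div_div_eq_div_mul]
  have g5 : (v / 4294967296 &&& (63 <<< 4)) >>> 4 = v / 68719476736 % 64 := by
    rw [group_eq]; norm_num [Nat.div_div_eq_div_mul]
  have g6 : ((v / 4294967296 &&& 15) <<< 2) + ((v % 4294967296) >>> 30) = v / 1073741824 % 64 := by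
    rw [and15]; exact mid_eq v
  have g7 : (v % 4294967296 &&& (63 <<< 24)) >>> 24 = v / 16777216 % 64 := by
    rw [group_eq]; norm_num
    omega
  have g8 : (v % 4294967296 &&& (63 <<< 18)) >>> 18 = v / 262144 % 64 := by
    rw [group_eq]; norm_num
    omega
  have g9 : (v % 4294967296 &&& (63 <<< 12)) >>> 12 = v / 4096 % 64 := by
    rw [group_eq]; norm_num
    omega
  have g10 : (v % 4294967296 &&& (63 <<< 6)) >>> 6 = v / 64 % 64 := by
    rw [group_eq]; norm_num
    omega
  have g11 : (v % 4294967296 &&& (63 <<< 0)) >>> 0 = v % 64 := by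
    rw [group_eq]; norm_num
  rw [g1, g2, g3, g4, g5, g6, g7, g8, g9, g10, g11]
  unfold trim_leading_zeros
  rw [← trim_padL 22 v (by norm_num; omega), pad22 v hv]
  simp only [String.toList_append, to_oct_mod, List.append_assoc, List.append_nil,
    show "".toList = ([] : List Char) from rfl]
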